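-- pv_equiv track=rewrite | github.com/TheAlgorithms/Python | hashes/fletcher32.py | fletcher32
-- ===== SOURCE A (Python) =====
-- def fletcher32(text: str) -> int:
--     '''
--     Turns the data into a list, and then loops them in pairs of two and adds to sums
--
--     >>> fletcher32('Apple')
--     705355030
--     >>> fletcher32('ABCDEFGHI')
--     3220837722
--     >>> fletcher32("abcd")
--     690407108
--     '''
--     data = bytes(text, "ascii")
--     sum1 = 0
--     sum2 = 0
--     data_list = list(data)
--     if len(data_list)%2 == 1:
--         data_list.append(0)
--     for idx in range(len(data_list)//2):
--         v = (data_list[idx*2+1] << 8) + data_list[idx*2]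
--         sum1 = (sum1+v)%65535
--         sum2 = (sum1+sum2)%65535
--     return (sum2 << 16) | sum1
-- ===== SOURCE B (Python) =====
-- def fletcher32(text: str) -> int:
--     data = list(bytes(text, "ascii"))
--     if len(data) % 2 == 1:
--         data.append(0)
--     # pair the bytes into little-endian 16-bit words in one pass
--     words = []
--     lo = None
--     for byte in data:
--         if lo is None:
--             lo = byte
--         else:
--             words.append((byte << 8) + lo)
--             lo = None
--     m = len(words)
--     sum1 = sum(words) % 65535
--     sum2 = sum(w * (m - j) for j, w in enumerate(words)) % 65535
--     return (sum2 << 16) | sum1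
-- ===== Notes on version B (the rewrite author's own statement) =====
-- stated objective: alternative
-- what changed: Replaces A's per-word two-accumulator modular recurrence (sum1/sum2 updated with % 65535 every iteration) by building the 16-bit word list once and computing sum1 as a plain sum and sum2 as a position-weighted sum sum(w*(m-j)), taking % 65535 only once at the end.
import Mathlib
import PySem

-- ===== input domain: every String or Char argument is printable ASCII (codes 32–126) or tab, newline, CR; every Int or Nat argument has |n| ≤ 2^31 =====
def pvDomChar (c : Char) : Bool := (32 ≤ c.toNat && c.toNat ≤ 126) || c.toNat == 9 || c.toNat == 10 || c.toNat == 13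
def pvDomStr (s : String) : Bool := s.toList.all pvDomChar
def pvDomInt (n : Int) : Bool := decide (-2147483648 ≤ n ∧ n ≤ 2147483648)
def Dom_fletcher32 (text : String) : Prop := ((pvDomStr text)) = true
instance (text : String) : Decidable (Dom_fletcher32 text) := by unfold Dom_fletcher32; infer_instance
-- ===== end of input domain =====

-- B replaces A's two-accumulator running recurrence by one position-weighted sum with a single final modulo (objective: alternative decomposition, same cost).

-- ===== PORT A =====
-- bytes(text, "ascii") on the ASCII domain is just the char codes; '<< 8' / '<< 16' on these
-- nonnegative values is exact multiplication by 256 / 65536; '|' is PySem.Int.bor; list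
-- indexing is always in range (even length), so getD is exact.
def fletcher32 (text : String) : Int :=
  let data : List Int := text.toList.map (fun c => (c.toNat : Int))
  let dataList : List Int := if data.length % 2 = 1 then data ++ [0] else data
  let res : Int × Int := (List.range (dataList.length / 2)).foldl
    (fun (s : Int × Int) idx =>
      let v : Int := (dataList.getD (idx * 2 + 1) 0) * 256 + dataList.getD (idx * 2) 0
      let sum1 := PySem.Int.mod (s.1 + v) 65535
      let sum2 := PySem.Int.mod (sum1 + s.2) 65535
      (sum1, sum2)) (0, 0)
  PySem.Int.bor (res.2 * 65536) res.1

-- ===== PORT B =====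
-- B's one-pass pairing loop: state = (pending low byte, words built so far); append = ++ [w].
def pvPairStep (st : Option Int × List Int) (byte : Int) : Option Int × List Int :=
  match st.1 with
  | none => (some byte, st.2)
  | some lo => (none, st.2 ++ [byte * 256 + lo])

def fletcher32_alt (text : String) : Int :=
  let data : List Int := text.toList.map (fun c => (c.toNat : Int))
  let dataList : List Int := if data.length % 2 = 1 then data ++ [0] else data
  let words := (dataList.foldl pvPairStep (none, [])).2
  let m : Int := words.length
  let sum1 := PySem.Int.mod words.sum 65535
  let sum2 := PySem.Int.mod ((words.zipIdx.map (fun p => p.1 * (m - (p.2 : Int)))).sum) 65535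
  PySem.Int.bor (sum2 * 65536) sum1

-- ===== PRECONDITION & SPEC =====
def Spec_fletcher32 (text : String) (out : Int) : Prop := out = fletcher32_alt text
instance (text : String) (out : Int) : Decidable (Spec_fletcher32 text out) := by unfold Spec_fletcher32; infer_instance

-- ===== CLAIM (what is proved, stated in full; the proofs are below) =====
def Claim_equal_fletcher32 : Prop := ∀ (text : String), Dom_fletcher32 text → Spec_fletcher32 text (fletcher32 text)

-- ===== LEMMAS AND PROOFS =====

-- the word list, as structural recursion (proof-side common form)
def pvWords : List Int → List Int
  | [] => []
  | [a] => [a]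
  | a :: b :: rest => (b * 256 + a) :: pvWords rest

-- B's pairing fold builds exactly pvWords on even-length lists
lemma pairFold_eq_pvWords : ∀ (l : List Int), l.length % 2 = 0 → ∀ (acc : List Int),
    l.foldl pvPairStep (none, acc) = (none, acc ++ pvWords l) := by
  intro l
  induction l using pvWords.induct with
  | case1 => intro _ acc; simp [pvWords]
  | case2 a => intro h; simp at h
  | case3 a b t ih =>
    intro h acc
    have ht : t.length % 2 = 0 := by simp at h; omega
    simp only [List.foldl_cons, pvPairStep]
    rw [ih ht (acc ++ [b * 256 + a])]
    simp [pvWords]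

-- A's loop body, on the word it actually processes.
def pvStep (s : Int × Int) (v : Int) : Int × Int :=
  (PySem.Int.mod (s.1 + v) 65535, PySem.Int.mod (PySem.Int.mod (s.1 + v) 65535 + s.2) 65535)

-- closed-form weighted sum (head weight = length)
def pvWsum : List Int → Int
  | [] => 0
  | v :: ws => v * (ws.length + 1) + pvWsum ws

lemma pvMod_eq (a : Int) : PySem.Int.mod a 65535 = a % 65535 :=
  PySem.Int.mod_eq_emod_of_pos (by norm_num)

-- A's indexed fold over pairs equals a fold over the word list, for any step function.
lemma idxFold_eq_wordFold (g : Int × Int → Int → Int × Int) :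
    ∀ (l : List Int), l.length % 2 = 0 → ∀ (s : Int × Int),
      (List.range (l.length / 2)).foldl
        (fun st idx => g st ((l.getD (idx * 2 + 1) 0) * 256 + l.getD (idx * 2) 0)) s
      = (pvWords l).foldl g s := by
  intro l
  induction l using pvWords.induct with
  | case1 => intro _ s; simp [pvWords]
  | case2 a => intro h; simp at h
  | case3 a b t ih =>
    intro h s
    have ht : t.length % 2 = 0 := by simp at h; omega
    have hlen : (a :: b :: t).length / 2 = t.length / 2 + 1 := by simp; omega
    rw [hlen, List.range_succ_eq_map]
    simp only [List.foldl_cons, List.foldl_map]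
    have hbody : (fun (st : Int × Int) (i : ℕ) =>
          g st (((a :: b :: t).getD (Nat.succ i * 2 + 1) 0) * 256 + (a :: b :: t).getD (Nat.succ i * 2) 0))
        = fun (st : Int × Int) (i : ℕ) =>
          g st ((t.getD (i * 2 + 1) 0) * 256 + t.getD (i * 2) 0) := by
      funext st i
      have h1 : Nat.succ i * 2 + 1 = (i * 2 + 1) + 2 := by omega
      have h2 : Nat.succ i * 2 = (i * 2) + 2 := by omega
      rw [h1, h2]
      simp [List.getD]
    rw [hbody, ih ht]
    have hfirst : g s (((a :: b :: t).getD (0 * 2 + 1) 0) * 256 + (a :: b :: t).getD (0 * 2) 0)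
        = g s (b * 256 + a) := by simp [List.getD]
    rw [hfirst]
    simp [pvWords]

-- characterization of A's running recurrence: one final modulo of plain and weighted sums
lemma fold_char : ∀ (ws : List Int) (S T : Int),
    ws.foldl pvStep (S % 65535, T % 65535)
      = ((S + ws.sum) % 65535, (T + ws.length * S + pvWsum ws) % 65535) := by
  intro ws
  induction ws with
  | nil => intro S T; simp [pvWsum]
  | cons v ws ih =>
    intro S T
    have hstep : pvStep (S % 65535, T % 65535) v = ((S + v) % 65535, (S + v + T) % 65535) := by
      simp only [pvStep, pvMod_eq, Prod.mk.injEq]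
      constructor <;> omega
    rw [List.foldl_cons, hstep, ih (S + v) (S + v + T)]
    simp only [Prod.mk.injEq, List.sum_cons, List.length_cons, pvWsum]
    push_cast
    constructor <;> ring_nf

lemma zipIdx_wsum : ∀ (ws : List Int) (n : ℕ) (c : Int), c = ws.length + n →
    ((ws.zipIdx n).map (fun p => p.1 * (c - (p.2 : Int)))).sum = pvWsum ws := by
  intro ws
  induction ws with
  | nil => intro n c _; simp [pvWsum]
  | cons v ws ih =>
    intro n c hc
    rw [List.zipIdx_cons]
    simp only [List.map_cons, List.sum_cons, pvWsum]
    rw [ih (n + 1) c (by push_cast [List.length_cons] at hc ⊢; omega)]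
    have : c - (n : Int) = ws.length + 1 := by push_cast [List.length_cons] at hc; omega
    rw [this]

lemma even_padded (data : List Int) :
    (if data.length % 2 = 1 then data ++ [0] else data).length % 2 = 0 := by
  split
  · simp only [List.length_append, List.length_cons, List.length_nil]; omega
  · omega

-- ===== VERDICT (by name: the statement is the Claim_ definition above) =====
theorem fletcher32_spec : Claim_equal_fletcher32 := by
  intro text _
  unfold Spec_fletcher32 fletcher32 fletcher32_alt
  dsimp only
  set data : List Int := text.toList.map (fun c => (c.toNat : Int)) with hdata
  set l : List Int := if data.length % 2 = 1 then data ++ [0] else data with hl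
  have hev : l.length % 2 = 0 := by rw [hl]; exact even_padded data
  have h1 := idxFold_eq_wordFold pvStep l hev (0, 0)
  simp only [pvStep] at h1
  rw [h1]
  rw [pairFold_eq_pvWords l hev []]
  dsimp only
  simp only [List.nil_append]
  have h2 : (pvWords l).foldl pvStep (0, 0)
      = ((pvWords l).sum % 65535, pvWsum (pvWords l) % 65535) := by
    have h := fold_char (pvWords l) 0 0
    norm_num at h
    simpa using h
  rw [h2]
  rw [zipIdx_wsum (pvWords l) 0 ((pvWords l).length : Int) (by norm_num)]
  simp
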